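-- pv_equiv track=rewrite | github.com/lpz7777777/JSCC_Recon_SPECT_Cylinder | compton_sparse_ops.py | _choose_compatible_ring_stride
-- ===== SOURCE A (Python) =====
-- def _choose_compatible_ring_stride(ring_length, rotate_num, target_stride):
--     if target_stride <= 1:
--         return 1
--
--     if ring_length % target_stride == 0 and rotate_num > 0 and ring_length % rotate_num == 0:
--         rotate_step = ring_length // rotate_num
--         for candidate in range(target_stride, 0, -1):
--             if ring_length % candidate == 0 and rotate_step % candidate == 0:
--                 return candidate
--         return 1
--
--     if rotate_num > 0 and ring_length % rotate_num == 0: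
--         rotate_step = ring_length // rotate_num
--         for candidate in range(target_stride, 0, -1):
--             if ring_length % candidate == 0 and rotate_step % candidate == 0:
--                 return candidate
--         return 1
--
--     for candidate in range(target_stride, 0, -1):
--         if ring_length % candidate == 0:
--             return candidate
--     return 1
-- ===== SOURCE B (Python) =====
-- def _gcd(a, b):
--     while b:
--         a, b = b, a % b
--     return a
--
--
-- def _choose_compatible_ring_stride(ring_length, rotate_num, target_stride):
--     if target_stride <= 1:
--         return 1
--     n = abs(ring_length)
--     if rotate_num > 0 and ring_length % rotate_num == 0:
--         n = _gcd(n, abs(ring_length // rotate_num))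
--     if n == 0:
--         return target_stride
--     best = 1
--     d = 1
--     while d * d <= n:
--         if n % d == 0:
--             if d <= target_stride and d > best:
--                 best = d
--             e = n // d
--             if e <= target_stride and e > best:
--                 best = e
--         d += 1
--     return best
-- ===== Notes on version B (the rewrite author's own statement) =====
-- stated objective: faster
-- what changed: B replaces A's downward linear scan over range(target_stride,0,-1) by computing g = gcd(|ring_length|, |rotate_step|) (or |ring_length|) once with Euclid and enumerating divisor pairs (d, g//d) only up to sqrt(g), keeping the largest divisor <= target_stride; A's two identical rotate branches collapse into one.
import Mathlib
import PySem

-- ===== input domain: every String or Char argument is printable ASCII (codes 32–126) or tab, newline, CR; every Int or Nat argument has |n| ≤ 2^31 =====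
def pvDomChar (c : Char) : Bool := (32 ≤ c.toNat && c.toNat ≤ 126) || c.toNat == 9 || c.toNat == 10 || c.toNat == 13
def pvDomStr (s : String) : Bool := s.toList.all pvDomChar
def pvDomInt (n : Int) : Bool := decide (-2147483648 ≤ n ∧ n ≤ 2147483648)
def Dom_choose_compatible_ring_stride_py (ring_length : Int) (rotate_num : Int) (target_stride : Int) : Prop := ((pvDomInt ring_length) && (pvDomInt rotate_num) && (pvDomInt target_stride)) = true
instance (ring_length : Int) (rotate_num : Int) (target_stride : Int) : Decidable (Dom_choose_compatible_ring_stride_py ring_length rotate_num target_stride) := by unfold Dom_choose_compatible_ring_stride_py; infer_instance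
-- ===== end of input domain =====

-- ===== PORT A =====
-- B computes the same largest compatible stride via gcd + sqrt-bounded divisor enumeration instead of A's linear downward scan (objective: faster).
-- generic transliteration of A's 'for candidate in range(target_stride, 0, -1): if cond(candidate): return candidate / return 1'
def pvScanDown (cond : Int → Prop) [DecidablePred cond] : Nat → Int
  | 0 => 1
  | c + 1 => if cond ((c : Int) + 1) then (c : Int) + 1 else pvScanDown cond c

def choose_compatible_ring_stride_py (ring_length : Int) (rotate_num : Int) (target_stride : Int) : Int :=
  if target_stride ≤ 1 then 1
  else if PySem.Int.mod ring_length target_stride = 0 ∧ 0 < rotate_num ∧ PySem.Int.mod ring_length rotate_num = 0 then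
    pvScanDown (fun cand => PySem.Int.mod ring_length cand = 0 ∧
      PySem.Int.mod (PySem.Int.floordiv ring_length rotate_num) cand = 0) target_stride.toNat
  else if 0 < rotate_num ∧ PySem.Int.mod ring_length rotate_num = 0 then
    pvScanDown (fun cand => PySem.Int.mod ring_length cand = 0 ∧
      PySem.Int.mod (PySem.Int.floordiv ring_length rotate_num) cand = 0) target_stride.toNat
  else
    pvScanDown (fun cand => PySem.Int.mod ring_length cand = 0) target_stride.toNat

-- ===== PORT B =====
-- Euclid's gcd, as hand-written in Source B (_gcd)
def pvGcd (a b : Nat) : Nat :=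
  if h : b = 0 then a else pvGcd b (a % b)
termination_by b
decreasing_by exact Nat.mod_lt _ (Nat.pos_of_ne_zero h)

-- body of Source B's while-loop: update 'best' with divisor d and cofactor n / d
def pvBestUpd (n : Nat) (t : Int) (d best : Nat) : Nat :=
  if n % d = 0 then
    if ((n / d : Nat) : Int) ≤ t ∧ (if (d : Int) ≤ t ∧ best < d then d else best) < n / d
    then n / d
    else (if (d : Int) ≤ t ∧ best < d then d else best)
  else best

-- Source B's 'while d * d <= n' loop
def pvDivScan (n : Nat) (t : Int) (d best : Nat) : Nat :=
  if h : d * d ≤ n then pvDivScan n t (d + 1) (pvBestUpd n t d best) else best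
termination_by n + 1 - d
decreasing_by
  have hdn : d ≤ n := by
    rcases Nat.eq_zero_or_pos d with h0 | h1
    · omega
    · calc d = d * 1 := (Nat.mul_one d).symm
        _ ≤ d * d := Nat.mul_le_mul_left d h1
        _ ≤ n := h
  omega

-- tail of Source B after computing n: 'if n == 0: return target_stride' then the sqrt divisor loop
def pvFromN (n : Nat) (t : Int) : Int :=
  if n = 0 then t else ((pvDivScan n t 1 1 : Nat) : Int)

def choose_compatible_ring_stride_py_alt (ring_length : Int) (rotate_num : Int) (target_stride : Int) : Int :=
  if target_stride ≤ 1 then 1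
  else
    pvFromN (if 0 < rotate_num ∧ PySem.Int.mod ring_length rotate_num = 0
             then pvGcd ring_length.natAbs (PySem.Int.floordiv ring_length rotate_num).natAbs
             else ring_length.natAbs) target_stride

-- ===== PRECONDITION & SPEC =====
def Spec_choose_compatible_ring_stride_py (ring_length : Int) (rotate_num : Int) (target_stride : Int) (out : Int) : Prop := out = choose_compatible_ring_stride_py_alt ring_length rotate_num target_stride
instance (ring_length : Int) (rotate_num : Int) (target_stride : Int) (out : Int) : Decidable (Spec_choose_compatible_ring_stride_py ring_length rotate_num target_stride out) := by unfold Spec_choose_compatible_ring_stride_py; infer_instance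

-- ===== CLAIM (what is proved, stated in full; the proofs are below) =====
def Claim_equal_choose_compatible_ring_stride_py : Prop := ∀ (ring_length : Int) (rotate_num : Int) (target_stride : Int), Dom_choose_compatible_ring_stride_py ring_length rotate_num target_stride → Spec_choose_compatible_ring_stride_py ring_length rotate_num target_stride (choose_compatible_ring_stride_py ring_length rotate_num target_stride)

-- ===== LEMMAS AND PROOFS =====

theorem pvGcd_eq (a b : Nat) : pvGcd a b = Nat.gcd a b := by
  induction b using Nat.strong_induction_on generalizing a with
  | _ b ih =>
    rw [pvGcd]
    split
    · simp_all
    · rename_i hb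
      rw [ih (a % b) (Nat.mod_lt _ (Nat.pos_of_ne_zero hb)) b,
          Nat.gcd_comm b (a % b), ← Nat.gcd_rec b a, Nat.gcd_comm]

-- A's descending scan returns the largest k ≤ c satisfying cond (cond 1 assumed)
theorem scanDown_max (cond : Int → Prop) [DecidablePred cond] (h1 : cond 1)
    (c : Nat) (hc : 1 ≤ c) :
    ∃ rr : Nat, pvScanDown cond c = (rr : Int) ∧ 1 ≤ rr ∧ rr ≤ c ∧ cond (rr : Int) ∧
      ∀ k : Nat, rr < k → k ≤ c → ¬ cond (k : Int) := by
  induction c with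
  | zero => omega
  | succ c ih =>
    rw [pvScanDown]
    split
    · exact ⟨c + 1, by push_cast; ring_nf, by omega, by omega, by push_cast at *; assumption,
        fun k h1 h2 => by omega⟩
    · rename_i hcnd
      rcases Nat.eq_zero_or_pos c with h0 | hpos
      · subst h0
        simp at hcnd
        exact absurd h1 hcnd
      · obtain ⟨rr, he, hr1, hrc, hcr, hmax⟩ := ih hpos
        refine ⟨rr, he, hr1, by omega, hcr, fun k hk1 hk2 => ?_⟩
        rcases Nat.lt_or_ge k (c + 1) with h | h
        · exact hmax k hk1 (by omega)
        · have : k = c + 1 := by omega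
          subst this
          push_cast
          push_cast at hcnd
          exact hcnd

theorem bu_mono (n : Nat) (t : Int) (d best : Nat) : best ≤ pvBestUpd n t d best := by
  unfold pvBestUpd
  split_ifs <;> omega

theorem bu_props (n : Nat) (hn : 1 ≤ n) (t : Int) (d best : Nat)
    (hb1 : 1 ≤ best) (hbd : best ∣ n) (hbt : (best : Int) ≤ t) :
    1 ≤ pvBestUpd n t d best ∧ pvBestUpd n t d best ∣ n ∧
      ((pvBestUpd n t d best : Nat) : Int) ≤ t := by
  by_cases hm : n % d = 0
  · have hd : 1 ≤ d := by
      rcases Nat.eq_zero_or_pos d with h0 | h1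
      · subst h0; simp at hm; omega
      · exact h1
    have hdd : d ∣ n := Nat.dvd_of_mod_eq_zero hm
    have hed : n / d ∣ n := Nat.div_dvd_of_dvd hdd
    have h1n : 1 ≤ n / d := Nat.div_pos (Nat.le_of_dvd (by omega) hdd) (by omega)
    unfold pvBestUpd
    rw [if_pos hm]
    split_ifs <;> refine ⟨by omega, ?_, by omega⟩ <;>
      first | exact hed | exact hdd | exact hbd
  · unfold pvBestUpd
    rw [if_neg hm]
    exact ⟨hb1, hbd, hbt⟩

theorem bu_cover (n : Nat) (t : Int) (d best : Nat) :
    (n % d = 0 → (d : Int) ≤ t → d ≤ pvBestUpd n t d best) ∧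
    (n % d = 0 → ((n / d : Nat) : Int) ≤ t → n / d ≤ pvBestUpd n t d best) := by
  unfold pvBestUpd
  constructor <;> intro hm hle <;> rw [if_pos hm] <;> split_ifs <;> omega

theorem divScan_spec (n : Nat) (hn : 1 ≤ n) (t : Int) :
    ∀ fuel d best : Nat, n + 1 - d ≤ fuel → 1 ≤ best → best ∣ n → (best : Int) ≤ t →
    (∀ k : Nat, k ∣ n → (k : Int) ≤ t → (k < d ∨ n / k < d) → k ≤ best) →
    (1 ≤ pvDivScan n t d best ∧ pvDivScan n t d best ∣ n ∧
      ((pvDivScan n t d best : Nat) : Int) ≤ t ∧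
      ∀ k : Nat, k ∣ n → (k : Int) ≤ t → k ≤ pvDivScan n t d best) := by
  intro fuel
  induction fuel with
  | zero =>
    intro d best hfuel hb1 hbd hbt hinv
    have hd : ¬ d * d ≤ n := by
      intro h
      have : d ≤ d * d := Nat.le_mul_of_pos_left d (by omega)
      omega
    rw [pvDivScan, dif_neg hd]
    refine ⟨hb1, hbd, hbt, fun k hk hkt => ?_⟩
    have : k ≤ n := Nat.le_of_dvd (by omega) hk
    exact hinv k hk hkt (Or.inl (by omega))
  | succ fuel ih =>
    intro d best hfuel hb1 hbd hbt hinv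
    rw [pvDivScan]
    split
    · rename_i h
      have hmono := bu_mono n t d best
      obtain ⟨hu1, hud, hut⟩ := bu_props n hn t d best hb1 hbd hbt
      have hcov := bu_cover n t d best
      have hdn : d ≤ n := by
        rcases Nat.eq_zero_or_pos d with h0 | h1
        · omega
        · calc d = d * 1 := (Nat.mul_one d).symm
            _ ≤ d * d := Nat.mul_le_mul_left d h1
            _ ≤ n := h
      apply ih (d + 1) _ (by omega) hu1 hud hut
      intro k hk hkt hkd
      have hk1 : 1 ≤ k := Nat.pos_of_dvd_of_pos hk (by omega)
      rcases hkd with hlt | hlt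
      · rcases Nat.lt_or_ge k d with hlt2 | hge
        · exact le_trans (hinv k hk hkt (Or.inl hlt2)) hmono
        · have hkd' : k = d := by omega
          subst hkd'
          exact hcov.1 (Nat.eq_zero_of_dvd_of_lt hk |> fun _ => Nat.mod_eq_zero_of_dvd hk) hkt
      · rcases Nat.lt_or_ge (n / k) d with hlt2 | hge
        · exact le_trans (hinv k hk hkt (Or.inr hlt2)) hmono
        · have hnkd : n / k = d := by omega
          have hddvd : d ∣ n := hnkd ▸ Nat.div_dvd_of_dvd hk
          have hkeq : k = n / d := by
            rw [← hnkd, Nat.div_div_self hk (by omega)]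
          rw [hkeq]
          rw [hkeq] at hkt
          exact hcov.2 (Nat.mod_eq_zero_of_dvd hddvd) hkt
    · rename_i hnd
      refine ⟨hb1, hbd, hbt, fun k hk hkt => ?_⟩
      have hk1 : 1 ≤ k := Nat.pos_of_dvd_of_pos hk (by omega)
      have hnk : n / k * k = n := Nat.div_mul_cancel hk
      have hcase : k < d ∨ n / k < d := by
        by_contra hcon
        push_neg at hcon
        have : d * d ≤ (n / k) * k := Nat.mul_le_mul hcon.2 hcon.1
        omega
      exact hinv k hk hkt hcase

-- divisor scan from (1,1) computes the largest divisor of g that is ≤ t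
theorem divScan_max (g : Nat) (hg : 1 ≤ g) (t : Int) (ht : 1 ≤ t) :
    1 ≤ pvDivScan g t 1 1 ∧ pvDivScan g t 1 1 ∣ g ∧
      ((pvDivScan g t 1 1 : Nat) : Int) ≤ t ∧
      ∀ k : Nat, k ∣ g → (k : Int) ≤ t → k ≤ pvDivScan g t 1 1 := by
  apply divScan_spec g hg t (g + 1) 1 1 (by omega) (by omega) (one_dvd g) (by exact_mod_cast ht)
  intro k hk hkt hkd
  rcases hkd with h | h
  · omega
  · exfalso
    have h0 : g / k = 0 := Nat.lt_one_iff.mp h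
    have hgk := Nat.div_mul_cancel hk
    rw [h0] at hgk
    simp at hgk
    omega

-- the two maximality characterisations coincide
theorem scan_eq_divScan (g : Nat) (hg : 1 ≤ g) (t : Int) (ht : 1 < t)
    (cond : Int → Prop) [DecidablePred cond]
    (hcond : ∀ k : Nat, 1 ≤ k → (cond (k : Int) ↔ k ∣ g)) :
    pvScanDown cond t.toNat = ((pvDivScan g t 1 1 : Nat) : Int) := by
  obtain ⟨rr, he, hr1, hrc, hcr, hmax⟩ :=
    scanDown_max cond (by exact_mod_cast (hcond 1 (by omega)).mpr (one_dvd g)) t.toNat (by omega)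
  obtain ⟨hb1, hbd, hbt, hbmax⟩ := divScan_max g hg t (by omega)
  have h1 : rr ≤ pvDivScan g t 1 1 := by
    apply hbmax rr ((hcond rr hr1).mp hcr)
    omega
  have h2 : pvDivScan g t 1 1 ≤ rr := by
    by_contra hcon
    push_neg at hcon
    exact hmax (pvDivScan g t 1 1) hcon (by omega) ((hcond _ hb1).mpr hbd)
  rw [he]
  omega

-- when cond holds on every positive candidate (divisor of 0) the scan returns target_stride
theorem scan_all (t : Int) (ht : 1 < t) (cond : Int → Prop) [DecidablePred cond]
    (hcond : ∀ k : Nat, 1 ≤ k → cond (k : Int)) :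
    pvScanDown cond t.toNat = t := by
  obtain ⟨rr, he, hr1, hrc, _, hmax⟩ :=
    scanDown_max cond (by exact_mod_cast hcond 1 (by omega)) t.toNat (by omega)
  have : rr = t.toNat := by
    by_contra hne
    exact hmax t.toNat (by omega) (by omega) (hcond t.toNat (by omega))
  rw [he]
  omega

theorem int_dvd_iff (k : Nat) (a : Int) : ((k : Int) ∣ a) ↔ k ∣ a.natAbs := by
  rw [← Int.natAbs_dvd_natAbs, Int.natAbs_natCast]

theorem dvd_gcd_iff' (k a b : Nat) : k ∣ Nat.gcd a b ↔ (k ∣ a ∧ k ∣ b) :=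
  ⟨fun h => ⟨dvd_trans h (Nat.gcd_dvd_left a b), dvd_trans h (Nat.gcd_dvd_right a b)⟩,
   fun h => Nat.dvd_gcd h.1 h.2⟩

-- scan = pvFromN, whichever way g degenerates
theorem scan_eq_fromN (g : Nat) (t : Int) (ht : 1 < t)
    (cond : Int → Prop) [DecidablePred cond]
    (hcond : ∀ k : Nat, 1 ≤ k → (cond (k : Int) ↔ k ∣ g)) :
    pvScanDown cond t.toNat = pvFromN g t := by
  unfold pvFromN
  by_cases hg : g = 0
  · rw [if_pos hg]
    apply scan_all t ht
    intro k hk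
    exact (hcond k hk).mpr (hg ▸ dvd_zero k)
  · rw [if_neg hg]
    exact scan_eq_divScan g (by omega) t ht cond hcond

-- ===== VERDICT (by name: the statement is the Claim_ definition above) =====
theorem choose_compatible_ring_stride_py_spec : Claim_equal_choose_compatible_ring_stride_py := by
  intro rl rot t _
  unfold Spec_choose_compatible_ring_stride_py
  unfold choose_compatible_ring_stride_py choose_compatible_ring_stride_py_alt
  split_ifs <;>
    first
      | rfl
      | tauto
      | (rw [pvGcd_eq]
         apply scan_eq_fromN _ t (by omega)
         intro k hk
         rw [PySem.Int.mod_eq_zero_iff_dvd, PySem.Int.mod_eq_zero_iff_dvd,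
           int_dvd_iff, int_dvd_iff, dvd_gcd_iff'])
      | (apply scan_eq_fromN _ t (by omega)
         intro k hk
         rw [PySem.Int.mod_eq_zero_iff_dvd, int_dvd_iff])
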